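-- pv_equiv track=rewrite | github.com/byxor/PythonLabs | 51/evil_51.py | isEvil
-- ===== SOURCE A (Python) =====
-- def isEvil(word):
-- 	evil = ["e", "v", "i", "l"]
-- 	currentIndex = 0
-- 	for character in word:
-- 		if currentIndex == 4:
-- 			break
-- 		if character.lower() == evil[currentIndex]:
-- 			currentIndex = currentIndex + 1
--
-- 	if currentIndex < 4:
-- 		return False
--
-- 	letterCount = {}
-- 	letterCount["e"] = countLetter("e", word)
-- 	letterCount["v"] = countLetter("v", word)
-- 	letterCount["i"] = countLetter("i", word)
-- 	letterCount["l"] = countLetter("l", word)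
-- 	for item in letterCount.items():
-- 		if item[1] > 1:
-- 			return False
--
-- 	return True
--
-- def countLetter(letter, word):
-- 	count = 0
-- 	for char in word:
-- 		if char.lower() == letter:
-- 			count = count + 1
-- 	return count
-- ===== SOURCE B (Python) =====
-- def isEvil(word):
--     letters = [c.lower() for c in word if c.lower() in ("e", "v", "i", "l")]
--     return letters == ["e", "v", "i", "l"]
-- ===== Notes on version B (the rewrite author's own statement) =====
-- stated objective: simpler
-- what changed: Replaces A's greedy subsequence pointer plus four counting passes and a dict with one filter pass (keep each character whose lower() is in {e,v,i,l}) compared for equality to ['e','v','i','l'], which enforces order and exactly-once occurrence at the same time.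
import Mathlib
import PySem

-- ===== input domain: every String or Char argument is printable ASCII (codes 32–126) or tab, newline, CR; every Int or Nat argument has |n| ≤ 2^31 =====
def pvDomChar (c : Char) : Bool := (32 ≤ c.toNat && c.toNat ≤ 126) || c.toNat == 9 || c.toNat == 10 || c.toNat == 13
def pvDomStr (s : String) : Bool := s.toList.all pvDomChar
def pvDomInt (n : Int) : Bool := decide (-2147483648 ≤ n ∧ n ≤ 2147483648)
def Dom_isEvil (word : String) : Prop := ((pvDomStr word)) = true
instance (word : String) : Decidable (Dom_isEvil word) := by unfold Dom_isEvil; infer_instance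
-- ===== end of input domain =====

-- B replaces A's greedy subsequence pointer plus four counting passes and a dict by a single
-- filter-and-compare pass (objective: simpler); return values agree on every input.


-- ===== PORT A =====
def countLetter (letter : List Char) (word : String) : Int :=
  word.toList.foldl
    (fun count char => if PySem.Chars.lower [char] == letter then count + 1 else count) 0

def isEvil (word : String) : Bool :=
  let evil : List (List Char) := [['e'], ['v'], ['i'], ['l']]
  let currentIndex : Nat :=
    word.toList.foldl
      (fun currentIndex character =>
        -- Python's 'if currentIndex == 4: break': once the index is 4 no iteration changes it
        if currentIndex == 4 then currentIndex
        -- evil[currentIndex] only ever read with currentIndex < 4, so getD's default is unreachable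
        else if PySem.Chars.lower [character] == evil.getD currentIndex [] then currentIndex + 1
        else currentIndex)
      0
  if currentIndex < 4 then false
  else
    let letterCount : PySem.Dict (List Char) Int :=
      ((((PySem.Dict.empty.insert ['e'] (countLetter ['e'] word)).insert
          ['v'] (countLetter ['v'] word)).insert
          ['i'] (countLetter ['i'] word)).insert
          ['l'] (countLetter ['l'] word))
    -- 'for item in letterCount.items(): if item[1] > 1: return False' then 'return True'
    if letterCount.items.any (fun item => item.2 > 1) then false else true

-- ===== PORT B =====
def isEvil_alt (word : String) : Bool :=
  let letters : List (List Char) :=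
    (word.toList.filter
        (fun c => [['e'], ['v'], ['i'], ['l']].contains (PySem.Chars.lower [c]))).map
      (fun c => PySem.Chars.lower [c])
  letters == [['e'], ['v'], ['i'], ['l']]

-- ===== PRECONDITION & SPEC =====
def Spec_isEvil (word : String) (out : Bool) : Prop := out = isEvil_alt word
instance (word : String) (out : Bool) : Decidable (Spec_isEvil word out) := by unfold Spec_isEvil; infer_instance

-- ===== CLAIM (what is proved, stated in full; the proofs are below) =====
def Claim_equal_isEvil : Prop := ∀ (word : String), Dom_isEvil word → Spec_isEvil word (isEvil word)

-- ===== LEMMAS AND PROOFS =====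

-- the lowered target word and the step function of A's greedy loop (on already-lowered chars)
def EVIL : List Char := ['e', 'v', 'i', 'l']

def gstep (i : Nat) (c : Char) : Nat :=
  if i == 4 then i
  else if [c] == ([['e'], ['v'], ['i'], ['l']] : List (List Char)).getD i [] then i + 1
  else i

theorem gstep_lt (i : Nat) (hi : i < 4) (c : Char) :
    gstep i c = if c = EVIL.getD i ' ' then i + 1 else i := by
  interval_cases i <;> simp [gstep, EVIL]

theorem evil_drop_succ (i : Nat) (hi : i < 4) :
    EVIL.drop i = EVIL.getD i ' ' :: EVIL.drop (i + 1) := by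
  interval_cases i <;> rfl

theorem greedy_four (l : List Char) : l.foldl gstep 4 = 4 := by
  induction l with
  | nil => rfl
  | cons c l ih => simpa [gstep] using ih

theorem greedy_iff (l : List Char) :
    ∀ i, i ≤ 4 → (l.foldl gstep i = 4 ↔ List.Sublist (EVIL.drop i) l) := by
  induction l with
  | nil =>
    intro i hi
    simp only [List.foldl_nil, List.sublist_nil, List.drop_eq_nil_iff]
    constructor
    · rintro rfl; simp [EVIL]
    · intro h; simp [EVIL] at h; omega
  | cons c l ih =>
    intro i hi
    by_cases h4 : i = 4
    · subst h4
      simp only [List.foldl_cons]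
      have : gstep 4 c = 4 := rfl
      rw [this, greedy_four]
      have hd : List.drop 4 EVIL = [] := by decide
      rw [hd]
      simp [List.nil_sublist]
    · have hi' : i < 4 := by omega
      rw [List.foldl_cons, gstep_lt i hi', evil_drop_succ i hi']
      split_ifs with hc
      · rw [ih (i + 1) (by omega), hc]
        exact (List.cons_sublist_cons).symm
      · rw [ih i hi, evil_drop_succ i hi']
        constructor
        · exact fun h => h.cons c
        · intro h
          cases h with
          | cons _ h => exact h
          | cons₂ _ h => exact absurd rfl hc
        
theorem greedy_le (l : List Char) : ∀ i, i ≤ 4 → l.foldl gstep i ≤ 4 := by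
  induction l with
  | nil => intro i hi; simpa using hi
  | cons c l ih =>
    intro i hi
    rw [List.foldl_cons]
    apply ih
    unfold gstep
    by_cases h1 : i = 4
    · simp [h1]
    · simp only [beq_iff_eq, if_neg h1]
      split_ifs <;> omega

-- membership in EVIL as the boolean predicate of B's filter, on lowered chars
def pE (c : Char) : Bool := EVIL.contains c

theorem core (m : List Char) :
    (m.foldl gstep 0 = 4 ∧ ∀ c ∈ EVIL, m.count c ≤ 1) ↔ m.filter pE = EVIL := by
  constructor
  · rintro ⟨hg, hc⟩
    have hsub : List.Sublist EVIL m := by simpa using (greedy_iff m 0 (by omega)).mp hg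
    have hfE : EVIL.filter pE = EVIL := by decide
    have hsubf : List.Sublist EVIL (m.filter pE) := hfE ▸ hsub.filter pE
    have hnd : (m.filter pE).Nodup := by
      rw [List.nodup_iff_count_le_one]
      intro a
      by_cases ha : pE a = true
      · rw [List.count_filter ha]
        exact hc a (by simpa [pE] using ha)
      · have h0 : List.count a (m.filter pE) = 0 :=
          List.count_eq_zero.mpr (fun hmem => ha (List.mem_filter.mp hmem).2)
        omega
    have hss : (m.filter pE) ⊆ EVIL := fun a ha => by
      simpa [pE] using (List.mem_filter.mp ha).2
    have hlen : (m.filter pE).length ≤ EVIL.length := (hnd.subperm hss).length_le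
    exact (hsubf.eq_of_length_le hlen).symm
  · intro h
    constructor
    · rw [greedy_iff m 0 (by omega)]
      simp only [List.drop_zero]
      rw [← h]
      exact List.filter_sublist
    · intro c hcE
      have hp : pE c = true := by simpa [pE] using hcE
      rw [← List.count_filter hp, h]
      exact List.nodup_iff_count_le_one.mp (by decide) c

theorem isEvil_eq (word : String) : isEvil word = isEvil_alt word := by
  rw [Bool.eq_iff_iff]
  -- rewrite both programs into statements about the lowered char list m
  set l := word.toList with hl
  have hlow : ∀ c : Char, PySem.Chars.lower [c] = [PySem.Chars.lowerChar c] := by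
    intro c; rfl
  -- A side
  have hA : isEvil word = true ↔
      ((l.map PySem.Chars.lowerChar).foldl gstep 0 = 4 ∧
        ∀ c ∈ EVIL, (l.map PySem.Chars.lowerChar).count c ≤ 1) := by
    unfold isEvil
    simp only [← hl, hlow]
    have hgr : l.foldl
        (fun i ch => if i == 4 then i
          else if [PySem.Chars.lowerChar ch] == ([['e'], ['v'], ['i'], ['l']] : List (List Char)).getD i []
          then i + 1 else i) 0
        = (l.map PySem.Chars.lowerChar).foldl gstep 0 := by
      rw [List.foldl_map]; rfl
    rw [hgr]
    have hcnt : ∀ x : Char, countLetter [x] word = ((l.map PySem.Chars.lowerChar).count x : Int) := by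
      intro x
      unfold countLetter
      simp only [← hl, hlow]
      have : ∀ (cs : List Char),
          cs.foldl (fun cnt ch => if [PySem.Chars.lowerChar ch] == [x] then cnt + 1 else cnt) 0
            = ((cs.map PySem.Chars.lowerChar).count x : Int) := by
        intro cs
        have := PySem.List.foldl_count_if (fun ch => [PySem.Chars.lowerChar ch] == [x]) cs 0
        rw [this]
        simp [List.count, List.countP_map, Function.comp_def]
      exact this l
    by_cases hg : (l.map PySem.Chars.lowerChar).foldl gstep 0 = 4
    · have hnl : ¬ (l.map PySem.Chars.lowerChar).foldl gstep 0 < 4 := by omega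
      simp only [hg, hcnt]
      simp only [PySem.Dict.empty, PySem.Dict.insert]
      simp [EVIL]
    · have hlt : (l.map PySem.Chars.lowerChar).foldl gstep 0 < 4 := by
        have := greedy_le (l.map PySem.Chars.lowerChar) 0 (by omega); omega
      simp [hlt, hg]
  -- B side
  have hB : isEvil_alt word = true ↔ (l.map PySem.Chars.lowerChar).filter pE = EVIL := by
    unfold isEvil_alt
    simp only [← hl, hlow]
    have hfil : (l.map PySem.Chars.lowerChar).filter pE
        = (l.filter (fun c => pE (PySem.Chars.lowerChar c))).map PySem.Chars.lowerChar := by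
      rw [List.filter_map]; rfl
    have hpred : ∀ c : Char,
        ([['e'], ['v'], ['i'], ['l']] : List (List Char)).contains [PySem.Chars.lowerChar c]
          = pE (PySem.Chars.lowerChar c) := by
      intro c; rw [Bool.eq_iff_iff]; simp [pE, EVIL]
    constructor
    · intro h
      rw [hfil]
      have h' : (l.filter (fun c => pE (PySem.Chars.lowerChar c))).map
          (fun c => [PySem.Chars.lowerChar c]) = [['e'], ['v'], ['i'], ['l']] := by
        simp only [hpred] at h
        exact beq_iff_eq.mp h
      have : (l.filter (fun c => pE (PySem.Chars.lowerChar c))).map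
          (fun c => [PySem.Chars.lowerChar c])
          = ((l.filter (fun c => pE (PySem.Chars.lowerChar c))).map PySem.Chars.lowerChar).map
              (fun c => [c]) := by
        simp [List.map_map, Function.comp]
      rw [this] at h'
      have hEm : (EVIL.map fun c => [c]) = ([['e'], ['v'], ['i'], ['l']] : List (List Char)) := rfl
      rw [← hEm] at h'
      exact List.map_injective_iff.mpr (fun a b hab => by simpa using hab) h'
    · intro h
      rw [hfil] at h
      simp only [hpred]
      apply beq_iff_eq.mpr
      have : (l.filter (fun c => pE (PySem.Chars.lowerChar c))).map
          (fun c => [PySem.Chars.lowerChar c])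
          = ((l.filter (fun c => pE (PySem.Chars.lowerChar c))).map PySem.Chars.lowerChar).map
              (fun c => [c]) := by
        simp [List.map_map, Function.comp]
      rw [this, h]; rfl
  rw [hA, hB]
  exact core (l.map PySem.Chars.lowerChar)

-- ===== VERDICT (by name: the statement is the Claim_ definition above) =====
theorem isEvil_spec : Claim_equal_isEvil := by
  intro word _
  unfold Spec_isEvil
  exact isEvil_eq word
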